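-- pv_equiv track=rewrite | github.com/fdiemon812/FlavioDiegoCV | PYTHON/mastermind/juego.py | compruebaNumero
-- ===== SOURCE A (Python) =====
-- def compruebaNumero(numero,miNumero):      #Comprueba la apuesta con el numero secreto y devuevle la pista para seguir
--     respuesta=["-","-","-","-","-"]
--     for k in range(0,len(numero)):
--         for i in range(0,len(miNumero)):
--
--             if numero[k]==miNumero[i] and k==i:
--                 respuesta[i]="X"
--
--
--             elif numero[k]==miNumero[i] and respuesta[i]!="X":   #PAra que la X no sea pisada por la Y
--                 respuesta[i]="Y"
--
--
--     return("%s%s%s%s%s"%(respuesta[0],respuesta[1],respuesta[2],respuesta[3],respuesta[4]))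
-- ===== SOURCE B (Python) =====
-- def compruebaNumero(numero, miNumero):
--     digitos = set(numero)
--
--     def pista(i):
--         if i < len(miNumero):
--             if i < len(numero) and numero[i] == miNumero[i]:
--                 return "X"
--             if miNumero[i] in digitos:
--                 return "Y"
--         return "-"
--
--     return "".join(pista(i) for i in range(5))
-- ===== Notes on version B (the rewrite author's own statement) =====
-- stated objective: simpler
-- what changed: Replaces A's stateful nested double scan that mutates a 5-slot list by a pure closed-form per-position function (X on positional match, Y via one precomputed set of secret digits, - otherwise) joined over the five output positions.
import Mathlib
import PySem

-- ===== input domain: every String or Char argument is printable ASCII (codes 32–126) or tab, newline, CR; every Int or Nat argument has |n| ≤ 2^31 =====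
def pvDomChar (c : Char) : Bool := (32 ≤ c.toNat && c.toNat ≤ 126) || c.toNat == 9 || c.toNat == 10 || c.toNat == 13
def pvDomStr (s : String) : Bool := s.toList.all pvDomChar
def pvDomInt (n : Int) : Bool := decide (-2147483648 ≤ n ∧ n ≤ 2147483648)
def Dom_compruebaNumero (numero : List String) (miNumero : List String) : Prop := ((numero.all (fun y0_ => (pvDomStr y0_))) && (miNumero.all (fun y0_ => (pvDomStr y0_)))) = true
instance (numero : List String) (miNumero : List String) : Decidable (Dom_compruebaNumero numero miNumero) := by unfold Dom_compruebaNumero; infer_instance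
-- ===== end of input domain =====

-- B replaces A's stateful nested double scan over a mutated 5-slot list by a pure per-position
-- closed form joined over the five output positions (simpler; same return value wherever A returns).

-- ===== PORT A =====
-- inner-loop body of A's nested loop: the two branches of the Python, in order.
-- List.set / List.getD are exact here because inside Pre_ every written index is < 5 = respuesta's
-- length and every read index is in range (out-of-range writes are Python IndexErrors, excluded by Pre_).
def pvStepA (numero miNumero : List String) (k : Nat) (r : List String) (i : Nat) : List String :=
  if numero.getD k "" = miNumero.getD i "" ∧ k = i then r.set i "X"
  else if numero.getD k "" = miNumero.getD i "" ∧ r.getD i "" ≠ "X" then r.set i "Y"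
  else r

def compruebaNumero (numero : List String) (miNumero : List String) : String :=
  let resp := (List.range numero.length).foldl
      (fun r k => (List.range miNumero.length).foldl (pvStepA numero miNumero k) r)
      ["-", "-", "-", "-", "-"]
  resp.getD 0 "" ++ resp.getD 1 "" ++ resp.getD 2 "" ++ resp.getD 3 "" ++ resp.getD 4 ""

-- ===== PORT B =====
-- Source B's helper pista(i): the hint character at position i, computed directly
-- (digitos = set(numero) is built once in compruebaNumero_alt)
def pvPista (numero miNumero : List String) (digitos : PySem.Set String) (i : Nat) : String :=
  if i < miNumero.length then
    if i < numero.length ∧ numero.getD i "" = miNumero.getD i "" then "X"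
    else if PySem.Set.contains digitos (miNumero.getD i "") then "Y"
    else "-"
  else "-"

-- "".join(pista(i) for i in range(5))
def compruebaNumero_alt (numero : List String) (miNumero : List String) : String :=
  let digitos := PySem.Set.ofList numero
  String.join ((List.range 5).map (pvPista numero miNumero digitos))

-- ===== PRECONDITION & SPEC =====
-- Pre_ excludes exactly the inputs where the Python A raises IndexError: a guess longer than 5
-- whose element at some position ≥ 5 occurs in the secret (respuesta[i] is then accessed out of range).
def Pre_compruebaNumero (numero : List String) (miNumero : List String) : Prop :=
  ∀ x ∈ miNumero.drop 5, x ∉ numero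
instance (numero : List String) (miNumero : List String) : Decidable (Pre_compruebaNumero numero miNumero) := by unfold Pre_compruebaNumero; infer_instance
def pvWitness_compruebaNumero : List String × List String := (["1", "2", "3"], ["1", "3", "9"])

def Spec_compruebaNumero (numero : List String) (miNumero : List String) (out : String) : Prop := out = compruebaNumero_alt numero miNumero
instance (numero : List String) (miNumero : List String) (out : String) : Decidable (Spec_compruebaNumero numero miNumero out) := by unfold Spec_compruebaNumero; infer_instance

-- ===== CLAIM (what is proved, stated in full; the proofs are below) =====
def Claim_equal_compruebaNumero : Prop := ∀ (numero : List String) (miNumero : List String), Dom_compruebaNumero numero miNumero → Pre_compruebaNumero numero miNumero → Spec_compruebaNumero numero miNumero (compruebaNumero numero miNumero)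

-- ===== LEMMAS AND PROOFS =====

-- the value both programs produce at position j (for j < 5)
def pvHint (numero miNumero : List String) (j : Nat) : String :=
  if j < miNumero.length ∧ j < numero.length ∧ numero.getD j "" = miNumero.getD j "" then "X"
  else if j < miNumero.length ∧ miNumero.getD j "" ∈ numero then "Y"
  else "-"

theorem pv_getD_set_ne (l : List String) (i j : Nat) (x d : String) (h : i ≠ j) :
    (l.set i x).getD j d = l.getD j d := by
  simp [List.getD, List.getElem?_set_ne h]

theorem pv_getD_set_self (l : List String) (i : Nat) (x d : String) (h : i < l.length) :
    (l.set i x).getD i d = x := by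
  simp [List.getD, h]

theorem pv_stepA_length (nu mi : List String) (k : Nat) (r : List String) (i : Nat) :
    (pvStepA nu mi k r i).length = r.length := by
  unfold pvStepA; split_ifs <;> simp

theorem pv_foldA_length (nu mi : List String) (k : Nat) (l : List Nat) (r : List String) :
    (l.foldl (pvStepA nu mi k) r).length = r.length := by
  induction l generalizing r with
  | nil => rfl
  | cons a t ih => simp [List.foldl, ih, pv_stepA_length]

theorem pv_outerA_length (nu mi : List String) (l : List Nat) (r : List String) :
    (l.foldl (fun r k => (List.range mi.length).foldl (pvStepA nu mi k) r) r).length = r.length := by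
  induction l generalizing r with
  | nil => rfl
  | cons a t ih => simp [List.foldl, ih, pv_foldA_length]

theorem pv_foldA_getD_not_mem (nu mi : List String) (k : Nat) (l : List Nat) (r : List String)
    (j : Nat) (h : j ∉ l) : (l.foldl (pvStepA nu mi k) r).getD j "" = r.getD j "" := by
  induction l generalizing r with
  | nil => rfl
  | cons a t ih =>
    have ha : a ≠ j := fun e => h (e ▸ List.mem_cons_self)
    have ht : j ∉ t := fun m => h (List.mem_cons_of_mem _ m)
    simp only [List.foldl]
    rw [ih _ ht]
    unfold pvStepA
    split_ifs <;> first | rfl | exact pv_getD_set_ne _ _ _ _ _ ha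

-- split List.range n at j (j < n) into a part avoiding j, the step at j, and a part avoiding j
theorem pv_range_split (n j : Nat) (h : j < n) :
    List.range n = (List.range j ++ [j]) ++ (List.range (n - (j + 1))).map (j + 1 + ·) := by
  have hn : n = (j + 1) + (n - (j + 1)) := by omega
  conv_lhs => rw [hn]
  rw [List.range_add, List.range_succ]

theorem pv_not_mem_left (j : Nat) : j ∉ List.range j := by simp
theorem pv_not_mem_right (n j : Nat) : j ∉ (List.range (n - (j + 1))).map (j + 1 + ·) := by
  simp; omega

-- effect of one step of A's inner loop on its own position
theorem pv_stepA_getD_self (nu mi : List String) (k : Nat) (r : List String) (j : Nat)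
    (h : j < r.length) :
    (pvStepA nu mi k r j).getD j "" =
      if nu.getD k "" = mi.getD j "" then
        (if k = j then "X" else if r.getD j "" = "X" then "X" else "Y")
      else r.getD j "" := by
  unfold pvStepA
  by_cases he : nu.getD k "" = mi.getD j ""
  · by_cases hk : k = j
    · subst hk
      rw [if_pos ⟨he, rfl⟩, pv_getD_set_self _ _ _ _ h, if_pos he, if_pos rfl]
    · rw [if_neg (fun hh => hk hh.2)]
      by_cases hx : r.getD j "" = "X"
      · rw [if_neg (fun hh => hh.2 hx), if_pos he, if_neg hk, if_pos hx]
        exact hx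
      · rw [if_pos ⟨he, hx⟩, pv_getD_set_self _ _ _ _ h, if_pos he, if_neg hk, if_neg hx]
  · rw [if_neg (fun hh => he hh.1), if_neg (fun hh => he hh.1), if_neg he]

-- inner fold of A, pointwise at j
theorem pv_innerA_getD (nu mi : List String) (k : Nat) (r : List String) (j : Nat)
    (hj : j < r.length) :
    ((List.range mi.length).foldl (pvStepA nu mi k) r).getD j "" =
      if j < mi.length ∧ nu.getD k "" = mi.getD j "" then
        (if k = j then "X" else if r.getD j "" = "X" then "X" else "Y")
      else r.getD j "" := by
  by_cases hn : j < mi.length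
  · rw [pv_range_split mi.length j hn, List.foldl_append, List.foldl_append,
      pv_foldA_getD_not_mem _ _ _ _ _ _ (pv_not_mem_right _ _)]
    simp only [List.foldl]
    have hlen : j < ((List.range j).foldl (pvStepA nu mi k) r).length := by
      rw [pv_foldA_length]; exact hj
    have hkeep : ((List.range j).foldl (pvStepA nu mi k) r).getD j "" = r.getD j "" :=
      pv_foldA_getD_not_mem _ _ _ _ _ _ (pv_not_mem_left j)
    rw [pv_stepA_getD_self _ _ _ _ _ hlen, hkeep]
    by_cases he : nu.getD k "" = mi.getD j "" <;> simp [hn]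
  · rw [pv_foldA_getD_not_mem _ _ _ _ _ _ (by simp; omega : j ∉ List.range mi.length)]
    simp [hn]

-- value of A's state at j after the first M outer iterations
def pvValA (nu mi : List String) (M j : Nat) : String :=
  if j < mi.length ∧ j < M ∧ nu.getD j "" = mi.getD j "" then "X"
  else if j < mi.length ∧ ∃ k, k < M ∧ nu.getD k "" = mi.getD j "" then "Y"
  else "-"

theorem pv_outerA_getD (nu mi : List String) (M j : Nat) (hj : j < 5) :
    ((List.range M).foldl (fun r k => (List.range mi.length).foldl (pvStepA nu mi k) r)
      ["-", "-", "-", "-", "-"]).getD j "" = pvValA nu mi M j := by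
  induction M with
  | zero =>
    have h1 : pvValA nu mi 0 j = "-" := by unfold pvValA; simp
    simp only [List.range_zero, List.foldl_nil]
    rw [h1]
    interval_cases j <;> rfl
  | succ M ih =>
    rw [List.range_succ, List.foldl_append]
    simp only [List.foldl]
    have hlen : j < (((List.range M).foldl
        (fun r k => (List.range mi.length).foldl (pvStepA nu mi k) r)
        ["-", "-", "-", "-", "-"] : List String)).length := by
      rw [pv_outerA_length]; simpa using hj
    rw [pv_innerA_getD _ _ _ _ _ hlen, ih]
    by_cases hn : j < mi.length
    · by_cases he : nu.getD M "" = mi.getD j ""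
      · have hex : ∃ k, k < M + 1 ∧ nu.getD k "" = mi.getD j "" := ⟨M, by omega, he⟩
        by_cases hk : M = j
        · subst hk
          rw [if_pos ⟨hn, he⟩, if_pos rfl]
          unfold pvValA
          rw [if_pos ⟨hn, by omega, he⟩]
        · rw [if_pos ⟨hn, he⟩, if_neg hk]
          by_cases hX : j < M ∧ nu.getD j "" = mi.getD j ""
          · have hpX : pvValA nu mi M j = "X" := by unfold pvValA; rw [if_pos ⟨hn, hX⟩]
            have hpX' : pvValA nu mi (M + 1) j = "X" := by
              unfold pvValA; rw [if_pos ⟨hn, by omega, hX.2⟩]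
            rw [hpX, if_pos rfl, hpX']
          · have hX' : ¬ (j < M + 1 ∧ nu.getD j "" = mi.getD j "") := by
              rintro ⟨ha, hb⟩
              rcases Nat.lt_succ_iff_lt_or_eq.mp ha with h' | h'
              · exact hX ⟨h', hb⟩
              · exact hk h'.symm
            have hpM : pvValA nu mi M j ≠ "X" := by
              unfold pvValA
              rw [if_neg (fun hh => hX hh.2)]
              split_ifs <;> decide
            have hpM1 : pvValA nu mi (M + 1) j = "Y" := by
              unfold pvValA
              rw [if_neg (fun hh => hX' hh.2), if_pos ⟨hn, hex⟩]
            rw [if_neg hpM, hpM1]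
      · rw [if_neg (fun hh => he hh.2)]
        have c1 : (j < mi.length ∧ j < M + 1 ∧ nu.getD j "" = mi.getD j "") ↔
            (j < mi.length ∧ j < M ∧ nu.getD j "" = mi.getD j "") := by
          constructor
          · rintro ⟨a, b, c⟩
            refine ⟨a, ?_, c⟩
            rcases Nat.lt_succ_iff_lt_or_eq.mp b with h' | h'
            · exact h'
            · exact absurd (by rw [← h']; exact c) he
          · rintro ⟨a, b, c⟩; exact ⟨a, by omega, c⟩
        have c2 : (j < mi.length ∧ ∃ k, k < M + 1 ∧ nu.getD k "" = mi.getD j "") ↔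
            (j < mi.length ∧ ∃ k, k < M ∧ nu.getD k "" = mi.getD j "") := by
          constructor
          · rintro ⟨a, k, hk, hke⟩
            rcases Nat.lt_succ_iff_lt_or_eq.mp hk with h' | h'
            · exact ⟨a, k, h', hke⟩
            · exact absurd (h' ▸ hke) he
          · rintro ⟨a, k, hk, hke⟩; exact ⟨a, k, by omega, hke⟩
        show pvValA nu mi M j = pvValA nu mi (M + 1) j
        unfold pvValA
        rw [if_congr c1 rfl (if_congr c2 rfl rfl)]
    · rw [if_neg (fun hh => hn hh.1)]
      unfold pvValA
      rw [if_neg (fun hh => hn hh.1), if_neg (fun hh => hn hh.1),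
        if_neg (fun hh => hn hh.1), if_neg (fun hh => hn hh.1)]

-- membership in the secret as an indexed existential
theorem pv_mem_iff_getD (nu : List String) (x : String) :
    x ∈ nu ↔ ∃ k, k < nu.length ∧ nu.getD k "" = x := by
  constructor
  · intro h
    rcases List.mem_iff_getElem.mp h with ⟨k, hk, he⟩
    exact ⟨k, hk, by rw [List.getD_eq_getElem _ _ hk]; exact he⟩
  · rintro ⟨k, hk, he⟩
    rw [← he, List.getD_eq_getElem _ _ hk]
    exact List.getElem_mem hk

-- A's final state agrees with pvHint at every j < 5
theorem pv_A_getD (nu mi : List String) (j : Nat) (hj : j < 5) :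
    ((List.range nu.length).foldl (fun r k => (List.range mi.length).foldl (pvStepA nu mi k) r)
      ["-", "-", "-", "-", "-"]).getD j "" = pvHint nu mi j := by
  rw [pv_outerA_getD nu mi nu.length j hj]
  unfold pvValA pvHint
  exact if_congr Iff.rfl rfl
    (if_congr (and_congr_right fun _ => (pv_mem_iff_getD nu (mi.getD j "")).symm) rfl rfl)

-- B's per-position function is exactly pvHint
theorem pv_pista_eq_hint (nu mi : List String) (j : Nat) :
    pvPista nu mi (PySem.Set.ofList nu) j = pvHint nu mi j := by
  have hcont : PySem.Set.contains (PySem.Set.ofList nu) (mi.getD j "") = true ↔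
      mi.getD j "" ∈ nu := by
    rw [PySem.Set.contains_iff, PySem.Set.mem_ofList]
  unfold pvPista pvHint
  by_cases hn : j < mi.length <;>
    by_cases hX : j < nu.length ∧ nu.getD j "" = mi.getD j "" <;>
      by_cases hm : mi.getD j "" ∈ nu <;>
        simp [hn, hX]

-- ===== VERDICT (by name: the statement is the Claim_ definition above) =====
theorem compruebaNumero_spec : Claim_equal_compruebaNumero := by
  intro numero miNumero _ _
  show compruebaNumero numero miNumero = compruebaNumero_alt numero miNumero
  unfold compruebaNumero compruebaNumero_alt
  simp only []
  have hr5 : List.range 5 = [0, 1, 2, 3, 4] := by decide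
  rw [hr5]
  simp only [List.map, String.join, List.foldl]
  rw [pv_pista_eq_hint, pv_pista_eq_hint, pv_pista_eq_hint, pv_pista_eq_hint, pv_pista_eq_hint,
    pv_A_getD numero miNumero 0 (by omega), pv_A_getD numero miNumero 1 (by omega),
    pv_A_getD numero miNumero 2 (by omega), pv_A_getD numero miNumero 3 (by omega),
    pv_A_getD numero miNumero 4 (by omega)]
  simp [String.append_assoc]
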